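-- pv_equiv track=rewrite | github.com/MinhNNM/python_code | kiem_tra_so_dep.py | check
-- ===== SOURCE A (Python) =====
-- def check(s):
--     check=1
--     for i in range(len(s)-2):
--         if s[i]!=s[i+2]:
--             check=0
--     if check==1 and len(set(s))==2:
--         return True
--     return False
-- ===== SOURCE B (Python) =====
-- def check(s):
--     return len(set(s)) == 2 and all(a != b for a, b in zip(s, s[1:]))
-- ===== Notes on version B (the rewrite author's own statement) =====
-- stated objective: simpler
-- what changed: Replaces the index loop comparing positions two apart for equality with a neighbour-pair scan (zip of the string with its tail) checking inequality of adjacent characters; over exactly two symbols the two predicates coincide; the set-size guard comes first and `and`/`all` short-circuit at the first failure where A always scans the whole string.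
import Mathlib
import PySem

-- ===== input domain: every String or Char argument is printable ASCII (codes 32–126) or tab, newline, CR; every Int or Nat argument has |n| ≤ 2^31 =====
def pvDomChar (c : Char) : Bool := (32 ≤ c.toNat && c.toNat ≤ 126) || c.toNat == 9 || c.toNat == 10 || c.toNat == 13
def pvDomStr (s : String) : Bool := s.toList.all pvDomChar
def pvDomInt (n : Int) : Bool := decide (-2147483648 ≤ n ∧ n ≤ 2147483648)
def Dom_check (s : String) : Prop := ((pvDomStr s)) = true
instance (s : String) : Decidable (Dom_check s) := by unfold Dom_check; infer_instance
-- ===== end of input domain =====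

-- B replaces A's two-apart-equality index loop with an adjacent-pair inequality scan
-- (zip with the tail); under the shared "exactly two distinct chars" guard they agree.

-- ===== PORT A =====
def check (s : String) : Bool :=
  let l := s.toList
  let chk : Int :=
    (PySem.List.pyRange 0 ((l.length : Int) - 2) 1).foldl
      (fun c i =>
        if PySem.List.pyGetD l i ' ' ≠ PySem.List.pyGetD l (i + 2) ' ' then 0 else c) 1
  if chk = 1 ∧ (PySem.Set.ofList l).length = 2 then true else false

-- ===== PORT B =====
def check_alt (s : String) : Bool :=
  let l := s.toList
  ((PySem.Set.ofList l).length == 2) && (l.zip (l.drop 1)).all (fun p => p.1 != p.2)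

-- ===== PRECONDITION & SPEC =====
def Spec_check (s : String) (out : Bool) : Prop := out = check_alt s
instance (s : String) (out : Bool) : Decidable (Spec_check s out) := by unfold Spec_check; infer_instance

-- ===== CLAIM (what is proved, stated in full; the proofs are below) =====
def Claim_equal_check : Prop := ∀ (s : String), Dom_check s → Spec_check s (check s)

-- ===== LEMMAS AND PROOFS =====

/-- A's predicate, structurally: every char equals the one two positions later. -/
def twoApartB : List Char → Bool
  | x :: y :: z :: t => (x == z) && twoApartB (y :: z :: t)
  | _ => true

/-- B's predicate, structurally: no two adjacent chars are equal. -/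
def adjDiffB : List Char → Bool
  | x :: y :: t => (x != y) && adjDiffB (y :: t)
  | _ => true

lemma zip_all_eq_adjDiffB (l : List Char) :
    (l.zip (l.drop 1)).all (fun p => p.1 != p.2) = adjDiffB l := by
  induction l with
  | nil => rfl
  | cons x t ih =>
    cases t with
    | nil => rfl
    | cons y t' =>
      have ih' : (((y :: t').zip t').all fun p => p.1 != p.2) = adjDiffB (y :: t') := by
        simpa using ih
      simp only [List.drop_succ_cons, List.drop_zero, List.zip_cons_cons, List.all_cons,
        adjDiffB, ih']

/-- A's flag loop: the flag survives iff every visited index passes the test. -/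
lemma foldl_flag (l : List Char) (ixs : List Int) (c : Int) :
    ixs.foldl
      (fun c i =>
        if PySem.List.pyGetD l i ' ' ≠ PySem.List.pyGetD l (i + 2) ' ' then 0 else c) c
    = if ∀ i ∈ ixs, PySem.List.pyGetD l i ' ' = PySem.List.pyGetD l (i + 2) ' ' then c else 0 := by
  induction ixs generalizing c with
  | nil => simp
  | cons i t ih =>
    rw [List.foldl_cons, ih]
    by_cases h : PySem.List.pyGetD l i ' ' = PySem.List.pyGetD l (i + 2) ' '
    · simp [h]
    · simp [h]

lemma twoApartB_iff (l : List Char) :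
    twoApartB l = true ↔ ∀ k : ℕ, (h : k + 2 < l.length) → l[k] = l[k + 2] := by
  induction l with
  | nil => simp [twoApartB]
  | cons x t ih =>
    cases t with
    | nil => simp [twoApartB]
    | cons y t' =>
      cases t' with
      | nil =>
        constructor
        · intro _ k hk; simp at hk
        · intro _; rfl
      | cons z t'' =>
        simp only [twoApartB, Bool.and_eq_true, beq_iff_eq, ih]
        constructor
        · rintro ⟨hxz, hrest⟩ k hk
          cases k with
          | zero => simpa using hxz
          | succ k' =>
            have := hrest k' (by simp at hk ⊢; omega)
            simpa using this
        · intro h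
          refine ⟨by simpa using h 0 (by simp), ?_⟩
          intro k hk
          have := h (k + 1) (by simp at hk ⊢; omega)
          simpa using this

/-- Over two symbols, "all adjacent differ" forces "two apart equal". -/
lemma adj_to_two (a b : Char) :
    ∀ (l : List Char), (∀ c ∈ l, c = a ∨ c = b) → adjDiffB l = true → twoApartB l = true := by
  intro l
  induction l with
  | nil => intro _ _; rfl
  | cons x t ih =>
    intro hmem hadj
    cases t with
    | nil => rfl
    | cons y t' =>
      cases t' with
      | nil => rfl
      | cons z t'' =>
        simp only [adjDiffB, Bool.and_eq_true, bne_iff_ne] at hadj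
        obtain ⟨hxy, hyz, hrest⟩ := hadj
        have hx : x = a ∨ x = b := hmem x (by simp)
        have hy : y = a ∨ y = b := hmem y (by simp)
        have hz : z = a ∨ z = b := hmem z (by simp)
        have hxz : x = z := by
          rcases hx with hx | hx <;> rcases hy with hy | hy <;> rcases hz with hz | hz <;>
            simp_all
        have : twoApartB (y :: z :: t'') = true := by
          apply ih
          · intro c hc; exact hmem c (by simp [hc])
          · simp only [adjDiffB, Bool.and_eq_true, bne_iff_ne]; exact ⟨hyz, hrest⟩
        simp [twoApartB, hxz, this]

/-- "Two apart equal" bounds the alphabet by the first two chars. -/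
lemma two_head (x y : Char) (t : List Char) :
    twoApartB (x :: y :: t) = true → ∀ c ∈ x :: y :: t, c = x ∨ c = y := by
  induction t generalizing x y with
  | nil => intro _ c hc; simp at hc; tauto
  | cons z t' ih =>
    intro h c hc
    simp only [twoApartB, Bool.and_eq_true, beq_iff_eq] at h
    obtain ⟨hxz, h2⟩ := h
    rcases List.mem_cons.mp hc with rfl | hc'
    · exact Or.inl rfl
    · have := ih y z h2 c hc'
      rcases this with h | h
      · exact Or.inr h
      · exact Or.inl (h.trans hxz.symm)

/-- "Two apart equal" with some adjacent pair equal collapses the list to one char. -/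
lemma all_eq_of_two_not_adj :
    ∀ (l : List Char), twoApartB l = true → adjDiffB l = false →
      ∀ c ∈ l, ∀ c' ∈ l, c = c' := by
  intro l
  induction l with
  | nil => simp
  | cons x t ih =>
    intro htwo hadj
    cases t with
    | nil => simp [adjDiffB] at hadj
    | cons y t' =>
      by_cases hxy : x = y
      · intro c hc c' hc'
        have h1 := two_head x y t' htwo c hc
        have h2 := two_head x y t' htwo c' hc'
        subst hxy
        rcases h1 with rfl | rfl <;> rcases h2 with h2 | h2 <;> simp [h2]
      · have hadj' : adjDiffB (y :: t') = false := by
          simp only [adjDiffB, Bool.and_eq_false_iff] at hadj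
          rcases hadj with h | h
          · simp at h; exact absurd h hxy
          · exact h
        cases t' with
        | nil => simp [adjDiffB] at hadj'
        | cons z t'' =>
          have htwo' : twoApartB (y :: z :: t'') = true := by
            simp only [twoApartB, Bool.and_eq_true] at htwo; exact htwo.2
          have hxz : x = z := by
            simp only [twoApartB, Bool.and_eq_true, beq_iff_eq] at htwo; exact htwo.1
          have hall := ih htwo' hadj'
          have hyz : y = z := hall y (by simp) z (by simp)
          exact absurd (hxz.trans hyz.symm) hxy

/-- A set of size 2 gives two distinct symbols bounding the list's alphabet. -/
lemma ofList_len_two (l : List Char) (h : (PySem.Set.ofList l).length = 2) :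
    ∃ a b, a ≠ b ∧ a ∈ l ∧ b ∈ l ∧ ∀ c ∈ l, c = a ∨ c = b := by
  obtain ⟨a, b, hm⟩ := List.length_eq_two.mp h
  have hnd := PySem.Set.nodup_ofList (xs := l)
  rw [hm] at hnd
  have hab : a ≠ b := by simp at hnd; exact hnd
  refine ⟨a, b, hab, ?_, ?_, ?_⟩
  · have : a ∈ PySem.Set.ofList l := by rw [hm]; simp
    exact (PySem.Set.mem_ofList _ _).mp this
  · have : b ∈ PySem.Set.ofList l := by rw [hm]; simp
    exact (PySem.Set.mem_ofList _ _).mp this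
  · intro c hc
    have : c ∈ PySem.Set.ofList l := (PySem.Set.mem_ofList _ _).mpr hc
    rw [hm] at this
    simpa using this

/-- A's loop result characterised through the structural predicate. -/
lemma chk_eq (l : List Char) :
    ((PySem.List.pyRange 0 ((l.length : Int) - 2) 1).foldl
      (fun c i =>
        if PySem.List.pyGetD l i ' ' ≠ PySem.List.pyGetD l (i + 2) ' ' then 0 else c) (1:Int) = 1)
    ↔ twoApartB l = true := by
  rw [foldl_flag]
  have hcond : (∀ i ∈ PySem.List.pyRange 0 ((l.length : Int) - 2) 1,
      PySem.List.pyGetD l i ' ' = PySem.List.pyGetD l (i + 2) ' ')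
      ↔ ∀ k : ℕ, (h : k + 2 < l.length) → l[k] = l[k + 2] := by
    constructor
    · intro h k hk
      have hi : (k : Int) ∈ PySem.List.pyRange 0 ((l.length : Int) - 2) 1 := by
        rw [PySem.List.mem_pyRange_one]
        constructor
        · exact_mod_cast Nat.zero_le k
        · omega
      have := h (k : Int) hi
      rw [show ((k : Int) + 2) = ((k + 2 : ℕ) : Int) by push_cast; ring] at this
      rw [PySem.List.pyGetD_natCast, PySem.List.pyGetD_natCast] at this
      rwa [List.getD_eq_getElem l ' ' (by omega), List.getD_eq_getElem l ' ' hk] at this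
    · intro h i hi
      rw [PySem.List.mem_pyRange_one] at hi
      obtain ⟨h0, h1⟩ := hi
      lift i to ℕ using h0 with k
      have hk : k + 2 < l.length := by omega
      rw [show ((k : Int) + 2) = ((k + 2 : ℕ) : Int) by push_cast; ring]
      rw [PySem.List.pyGetD_natCast, PySem.List.pyGetD_natCast]
      rw [List.getD_eq_getElem l ' ' (by omega), List.getD_eq_getElem l ' ' hk]
      exact h k hk
  constructor
  · intro h
    rw [twoApartB_iff]
    apply hcond.mp
    by_contra hP
    rw [if_neg hP] at h
    exact absurd h (by norm_num)
  · intro h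
    rw [if_pos (hcond.mpr ((twoApartB_iff l).mp h))]

-- ===== VERDICT (by name: the statement is the Claim_ definition above) =====
theorem check_spec : Claim_equal_check := by
  unfold Claim_equal_check
  intro s _
  unfold Spec_check check check_alt
  simp only [chk_eq, zip_all_eq_adjDiffB]
  by_cases hset : (PySem.Set.ofList s.toList).length = 2
  · obtain ⟨a, b, hab, ha, hb, hmem⟩ := ofList_len_two _ hset
    have hTA : twoApartB s.toList = adjDiffB s.toList := by
      cases hAD : adjDiffB s.toList with
      | true => rw [adj_to_two a b s.toList hmem hAD]
      | false =>
        cases hT : twoApartB s.toList with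
        | false => rfl
        | true => exact absurd (all_eq_of_two_not_adj s.toList hT hAD a ha b hb) hab
    rw [hset, hTA]
    cases adjDiffB s.toList <;> simp
  · simp [hset]
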